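-- pv_equiv track=rewrite | github.com/AharonSambol/AdventOfCode | 2025/pythonSolutions/day11.py | traverse2
-- ===== SOURCE A (Python) =====
-- NODE_NAME_TO_FLAG = {"out": 0b001, "dac": 0b010, "fft": 0b100}
--
-- def traverse2(
--     graph: dict[str, list[str]],
--     node: str,
--     dest: str,
--     cache: dict[str, dict[int, int]]
-- ) -> dict[int, int]:
--     if node == dest:
--         return {NODE_NAME_TO_FLAG[node]: 1}
--     if node in cache:
--         return cache[node]
--     res = {}
--     for child in graph[node]:
--         option = traverse2(graph, child, dest, cache)
--         for k, v in option.items():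
--             res[k] = res.get(k, 0) + v
--     if node in NODE_NAME_TO_FLAG:
--         res = {
--             k + NODE_NAME_TO_FLAG[node]: v
--             for k, v in res.items()
--         }
--     cache[node] = res
--     return res
-- ===== SOURCE B (Python) =====
-- NODE_NAME_TO_FLAG = {"out": 0b001, "dac": 0b010, "fft": 0b100}
--
--
-- def traverse2(graph, node, dest, cache):
--     # Iterative rewrite: breadth-first collection of the uncached nodes that need
--     # computing, then repeated reverse-topological passes that resolve each node
--     # from its children's already-computed maps.  Does not mutate `cache`
--     # (equivalence is about the return value).
--     if node == dest:
--         return {NODE_NAME_TO_FLAG[node]: 1}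
--     memo = dict(cache)
--     if node in memo:
--         return memo[node]
--     # phase 1: collect every reachable node that still needs a value
--     reach = []
--     frontier = [node]
--     while frontier:
--         nxt = []
--         for n in frontier:
--             if n != dest and n not in memo and n not in reach:
--                 reach.append(n)
--                 nxt.extend(graph[n])
--         frontier = nxt
--     # phase 2: resolve in reverse-topological order by repeated passes
--     remaining = reach
--     while remaining:
--         rest = []
--         for n in remaining:
--             if all(c == dest or c in memo for c in graph[n]):
--                 res = {}
--                 for c in graph[n]:
--                     opt = {NODE_NAME_TO_FLAG[c]: 1} if c == dest else memo[c]
--                     for k, v in opt.items():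
--                         res[k] = res.get(k, 0) + v
--                 if n in NODE_NAME_TO_FLAG:
--                     res = {k + NODE_NAME_TO_FLAG[n]: v for k, v in res.items()}
--                 memo[n] = res
--             else:
--                 rest.append(n)
--         if len(rest) == len(remaining):
--             break  # cycle: unresolvable (original recurses forever here)
--         remaining = rest
--     return memo[node]
-- ===== Notes on version B (the rewrite author's own statement) =====
-- stated objective: alternative
-- what changed: Replaces the memoized recursion (which mutates the caller's cache) with an explicit two-phase iteration: a breadth-first collection of the uncached reachable nodes followed by repeated reverse-topological passes that resolve each node from its children's finished maps; the return value is identical, B does not mutate cache.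
import Mathlib
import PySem

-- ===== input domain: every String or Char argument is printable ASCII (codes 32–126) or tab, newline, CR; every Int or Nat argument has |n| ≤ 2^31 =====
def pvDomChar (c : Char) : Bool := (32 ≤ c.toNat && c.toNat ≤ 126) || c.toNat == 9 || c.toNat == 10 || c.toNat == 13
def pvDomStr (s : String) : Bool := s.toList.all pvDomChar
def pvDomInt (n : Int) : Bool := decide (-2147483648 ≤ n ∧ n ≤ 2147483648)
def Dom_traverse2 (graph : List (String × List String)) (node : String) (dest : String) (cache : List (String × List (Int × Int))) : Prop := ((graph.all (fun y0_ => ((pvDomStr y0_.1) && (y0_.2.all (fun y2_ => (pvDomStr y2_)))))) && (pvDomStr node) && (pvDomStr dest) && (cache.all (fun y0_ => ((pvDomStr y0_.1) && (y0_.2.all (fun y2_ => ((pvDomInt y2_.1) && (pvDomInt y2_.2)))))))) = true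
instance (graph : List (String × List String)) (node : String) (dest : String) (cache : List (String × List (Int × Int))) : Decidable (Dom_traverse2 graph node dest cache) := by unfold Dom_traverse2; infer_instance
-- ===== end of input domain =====

-- B replaces the memoized recursion by an iterative two-phase computation (reachability
-- collection, then reverse-topological passes); return values agree, but A additionally
-- mutates `cache` in place while B does not — the equivalence is about the return value only.

-- ===== PORT A =====

-- NODE_NAME_TO_FLAG (module constant, shared by both Pythons)
def pvFlags : PySem.Dict String Int := PySem.Dict.mk [("out", 1), ("dac", 2), ("fft", 4)]

-- `for k, v in option.items(): res[k] = res.get(k, 0) + v`  (shared verbatim by A and Source B)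
def pvMerge (res : PySem.Dict Int Int) (opt : List (Int × Int)) : PySem.Dict Int Int :=
  opt.foldl (fun r kv => r.insert kv.1 (r.getD kv.1 0 + kv.2)) res

-- `if node in NODE_NAME_TO_FLAG: res = {k + NODE_NAME_TO_FLAG[node]: v for k, v in res.items()}`
def pvShift (node : String) (res : PySem.Dict Int Int) : PySem.Dict Int Int :=
  match pvFlags.get? node with
  | some fl => res.items.foldl (fun r kv => r.insert (kv.1 + fl) kv.2) PySem.Dict.empty
  | none => res

-- recursive body of A; fuel-indexed (Python recursion); `none` = an exception is raised.
-- The evolving `cache` dict is threaded as state (Python mutates it in place).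
def travA (graph : PySem.Dict String (List String)) (dest : String) :
    Nat → String → PySem.Dict String (List (Int × Int)) →
    Option (List (Int × Int)) × PySem.Dict String (List (Int × Int))
  | 0, _, c => (none, c)
  | f + 1, node, c =>
    if node = dest then
      match pvFlags.get? node with
      | some fl => (some [(fl, 1)], c)
      | none => (none, c)
    else
      match c.get? node with
      | some v => (some v, c)
      | none =>
        match graph.get? node with
        | none => (none, c)
        | some children =>
          let st := children.foldl
            (fun (st : Option (PySem.Dict Int Int) × PySem.Dict String (List (Int × Int))) child =>
              match st with
              | (none, cc) => (none, cc)
              | (some res, cc) =>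
                match travA graph dest f child cc with
                | (none, cc') => (none, cc')
                | (some opt, cc') => (some (pvMerge res opt), cc'))
            (some PySem.Dict.empty, c)
          match st with
          | (none, c') => (none, c')
          | (some res, c') =>
            let res2 := pvShift node res
            (some res2.items, c'.insert node res2.items)

def traverse2 (graph : List (String × List String)) (node : String) (dest : String) (cache : List (String × List (Int × Int))) : List (Int × Int) :=
  ((travA (PySem.Dict.mk graph) dest (graph.length + 2) node (PySem.Dict.mk cache)).1).getD []

-- ===== PORT B =====

-- one pass of Source B's phase-1 `for n in frontier:` loop; `none` = KeyError on graph[n]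
def travBReachPass (graph : PySem.Dict String (List String)) (dest : String)
    (memo : PySem.Dict String (List (Int × Int))) (frontier : List String) (reach : List String) :
    Option (List String × List String) :=
  frontier.foldl
    (fun acc n =>
      match acc with
      | none => none
      | some (reach, nxt) =>
        if n ≠ dest ∧ memo.contains n = false ∧ n ∉ reach then
          match graph.get? n with
          | none => none
          | some cs => some (reach ++ [n], nxt ++ cs)
        else some (reach, nxt))
    (some (reach, []))

-- phase-1 `while frontier:` loop, fuel-indexed
def travBReach (graph : PySem.Dict String (List String)) (dest : String)
    (memo : PySem.Dict String (List (Int × Int))) :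
    Nat → List String → List String → Option (List String)
  | 0, reach, frontier => match frontier with | [] => some reach | _ => none
  | f + 1, reach, frontier =>
    match frontier with
    | [] => some reach
    | _ =>
      match travBReachPass graph dest memo frontier reach with
      | none => none
      | some (reach', nxt) => travBReach graph dest memo f reach' nxt

-- resolving one node from its children's finished maps (body of the `if all(...)` branch)
def travBResolve (dest : String) (memo : PySem.Dict String (List (Int × Int)))
    (n : String) (cs : List String) : Option (List (Int × Int)) :=
  let step := cs.foldl
    (fun (acc : Option (PySem.Dict Int Int)) c =>
      match acc with
      | none => none
      | some res =>
        match (if c = dest then (pvFlags.get? c).map (fun fl => [(fl, 1)]) else memo.get? c) with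
        | none => none
        | some m => some (pvMerge res m))
    (some PySem.Dict.empty)
  match step with
  | none => none
  | some res => some (pvShift n res).items

-- one pass of the phase-2 `for n in remaining:` loop
def travBKahnPass (graph : PySem.Dict String (List String)) (dest : String)
    (remaining : List String) (memo : PySem.Dict String (List (Int × Int))) :
    Option (List String × PySem.Dict String (List (Int × Int))) :=
  remaining.foldl
    (fun acc n =>
      match acc with
      | none => none
      | some (rest, memo) =>
        match graph.get? n with
        | none => none
        | some cs =>
          if cs.all (fun c => c == dest || memo.contains c) then
            match travBResolve dest memo n cs with
            | none => none
            | some items => some (rest, memo.insert n items)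
          else some (rest ++ [n], memo))
    (some ([], memo))

-- phase-2 `while remaining:` loop, fuel-indexed; `break` (no progress) returns the memo as is
def travBKahn (graph : PySem.Dict String (List String)) (dest : String) :
    Nat → List String → PySem.Dict String (List (Int × Int)) →
    Option (PySem.Dict String (List (Int × Int)))
  | 0, remaining, memo => match remaining with | [] => some memo | _ => none
  | f + 1, remaining, memo =>
    match remaining with
    | [] => some memo
    | _ =>
      match travBKahnPass graph dest remaining memo with
      | none => none
      | some (rest, memo') =>
        if rest.length = remaining.length then some memo'
        else travBKahn graph dest f rest memo'

def traverse2_alt (graph : List (String × List String)) (node : String) (dest : String) (cache : List (String × List (Int × Int))) : List (Int × Int) :=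
  if node = dest then
    match pvFlags.get? node with
    | some fl => [(fl, 1)]
    | none => []
  else
    let memo := PySem.Dict.mk cache
    match memo.get? node with
    | some v => v
    | none =>
      match travBReach (PySem.Dict.mk graph) dest memo (graph.length + 2) [] [node] with
      | none => []
      | some reach =>
        match travBKahn (PySem.Dict.mk graph) dest (reach.length + 1) reach memo with
        | none => []
        | some memo' => (memo'.get? node).getD []

-- ===== PRECONDITION & SPEC =====

-- is n a node the recursion would have to COMPUTE (not dest, not cached)?
def pvActive (dest : String) (cacheD : PySem.Dict String (List (Int × Int))) (n : String) : Bool :=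
  !(n == dest) && !(cacheD.contains n)

-- the set of nodes A's recursion visits and computes: closure of {node} under children, stopping
-- at dest and at cached nodes (computed by iterating one closure step to a fixpoint)
def pvReachStep (graph : PySem.Dict String (List String)) (dest : String)
    (cacheD : PySem.Dict String (List (Int × Int))) (S : List String) : List String :=
  S.foldl
    (fun acc n =>
      if pvActive dest cacheD n then
        (graph.getD n []).foldl (fun acc c => if pvActive dest cacheD c ∧ c ∉ acc then acc ++ [c] else acc) acc
      else acc)
    S

def pvReachSet (graph : PySem.Dict String (List String)) (dest : String)
    (cacheD : PySem.Dict String (List (Int × Int))) (node : String) : List String :=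
  Nat.rec (if pvActive dest cacheD node then [node] else [])
    (fun _ S => pvReachStep graph dest cacheD S)
    (graph.items.foldl (fun a p => a + p.2.length) 1)

-- one elimination pass: append every not-yet-ordered reachable node whose children are all settled
def pvTopoStep (graph : PySem.Dict String (List String)) (dest : String)
    (cacheD : PySem.Dict String (List (Int × Int))) (R : List String) (L : List String) : List String :=
  R.foldl
    (fun L n =>
      if (!(L.contains n) &&
         (match graph.get? n with
          | some cs => cs.all (fun c => c == dest || cacheD.contains c || L.contains c)
          | none => false)) = true then L ++ [n]
      else L)
    L

-- a candidate reverse-topological order of the reachable uncached nodes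
def pvTopo (graph : PySem.Dict String (List String)) (dest : String)
    (cacheD : PySem.Dict String (List (Int × Int))) (node : String) : List String :=
  let R := pvReachSet graph dest cacheD node
  Nat.rec [] (fun _ L => pvTopoStep graph dest cacheD R L) (R.length + 1)

-- check that L is a valid computation order: every listed node is uncached, not dest, present in
-- graph, and all its children are dest, cached, or listed EARLIER
def pvChainOK (graph : PySem.Dict String (List String)) (dest : String)
    (cacheD : PySem.Dict String (List (Int × Int))) : List String → List String → Bool
  | _, [] => true
  | seen, n :: rest =>
    (!(n == dest) && !(cacheD.contains n) &&
      (match graph.get? n with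
       | some cs => cs.all (fun c => c == dest || cacheD.contains c || seen.contains c)
       | none => false)) && pvChainOK graph dest cacheD (seen ++ [n]) rest

-- Pre_ excludes (i) inputs where A raises (KeyError on a missing graph/flag key along the
-- recursion, RecursionError on a cycle among the nodes it must compute), and (ii) association
-- lists with duplicate keys (outer or inner), on which the Python dict built at the call boundary
-- keeps only the last value while the assoc-list ports read the first; Python's dict arguments
-- themselves can never carry duplicates, so within the dict input space Pre_ is exactly A's
-- return domain.
def Pre_traverse2 (graph : List (String × List String)) (node : String) (dest : String) (cache : List (String × List (Int × Int))) : Prop :=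
  let graphD := PySem.Dict.mk graph
  let cacheD := PySem.Dict.mk cache
  let L := pvTopo graphD dest cacheD node
  (graph.map Prod.fst).Nodup ∧ (cache.map Prod.fst).Nodup ∧
  (∀ p ∈ cache, (p.2.map Prod.fst).Nodup) ∧
  L.Nodup ∧ pvChainOK graphD dest cacheD [] L = true ∧
  (node = dest ∨ cacheD.contains node = true ∨ node ∈ L) ∧
  ((node = dest ∨ ∃ n ∈ L, dest ∈ graphD.getD n []) → pvFlags.contains dest = true)

instance (graph : List (String × List String)) (node : String) (dest : String) (cache : List (String × List (Int × Int))) : Decidable (Pre_traverse2 graph node dest cache) := by unfold Pre_traverse2; infer_instance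

def pvWitness_traverse2 : (List (String × List String)) × String × String × (List (String × List (Int × Int))) :=
  ([("a", ["dac"])], "a", "dac", [])

def Spec_traverse2 (graph : List (String × List String)) (node : String) (dest : String) (cache : List (String × List (Int × Int))) (out : List (Int × Int)) : Prop := out = traverse2_alt graph node dest cache
instance (graph : List (String × List String)) (node : String) (dest : String) (cache : List (String × List (Int × Int))) (out : List (Int × Int)) : Decidable (Spec_traverse2 graph node dest cache out) := by unfold Spec_traverse2; infer_instance

-- ===== CLAIM (what is proved, stated in full; the proofs are below) =====
def Claim_equal_traverse2 : Prop := ∀ (graph : List (String × List String)) (node : String) (dest : String) (cache : List (String × List (Int × Int))), Dom_traverse2 graph node dest cache → Pre_traverse2 graph node dest cache → Spec_traverse2 graph node dest cache (traverse2 graph node dest cache)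

-- ===== LEMMAS AND PROOFS =====
-- reference semantics: the value of a node computed against the ORIGINAL cache only
def pureF (graph : PySem.Dict String (List String)) (dest : String)
    (cacheD : PySem.Dict String (List (Int × Int))) :
    Nat → String → Option (List (Int × Int))
  | 0, _ => none
  | f + 1, n =>
    if n = dest then (pvFlags.get? n).map (fun fl => [(fl, 1)])
    else
      match cacheD.get? n with
      | some v => some v
      | none =>
        match graph.get? n with
        | none => none
        | some cs =>
          (cs.foldl
            (fun (acc : Option (PySem.Dict Int Int)) c =>
              match acc with
              | none => none
              | some res =>
                match pureF graph dest cacheD f c with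
                | none => none
                | some m => some (pvMerge res m))
            (some PySem.Dict.empty)).map (fun res => (pvShift n res).items)

def PureV (graph : PySem.Dict String (List String)) (dest : String)
    (cacheD : PySem.Dict String (List (Int × Int))) (n : String) (v : List (Int × Int)) : Prop :=
  ∃ f, pureF graph dest cacheD f n = some v

theorem pureF_fold_mono (graph : PySem.Dict String (List String)) (dest : String)
    (cacheD : PySem.Dict String (List (Int × Int))) (f : Nat)
    (ih : ∀ n v, pureF graph dest cacheD f n = some v → pureF graph dest cacheD (f+1) n = some v)
    (cs : List String) (res : PySem.Dict Int Int) (r : PySem.Dict Int Int)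
    (h : cs.foldl
            (fun (acc : Option (PySem.Dict Int Int)) c =>
              match acc with
              | none => none
              | some res =>
                match pureF graph dest cacheD f c with
                | none => none
                | some m => some (pvMerge res m))
            (some res) = some r) :
    cs.foldl
            (fun (acc : Option (PySem.Dict Int Int)) c =>
              match acc with
              | none => none
              | some res =>
                match pureF graph dest cacheD (f+1) c with
                | none => none
                | some m => some (pvMerge res m))
            (some res) = some r := by
  induction cs generalizing res with
  | nil => simpa using h
  | cons c cs ihc =>
    simp only [List.foldl_cons] at h ⊢
    cases hc : pureF graph dest cacheD f c with
    | none =>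
      exfalso
      rw [hc] at h
      -- foldl from none is none
      clear ihc ih hc
      induction cs with
      | nil => simp at h
      | cons d ds ihd => simp only [List.foldl_cons] at h; exact ihd h
    | some m => rw [hc] at h; rw [ih _ _ hc]; exact ihc _ h


theorem pureF_mono_succ (graph : PySem.Dict String (List String)) (dest : String)
    (cacheD : PySem.Dict String (List (Int × Int))) (f : Nat) :
    ∀ n v, pureF graph dest cacheD f n = some v → pureF graph dest cacheD (f+1) n = some v := by
  induction f with
  | zero => intro n v h; simp [pureF] at h
  | succ f ih =>
    intro n v h
    rw [pureF] at h ⊢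
    by_cases hd : n = dest
    · simpa [hd] using h
    · simp only [if_neg hd] at h ⊢
      cases hc : cacheD.get? n with
      | some w => rw [hc] at h; exact h
      | none =>
        rw [hc] at h; try rw [hc]
        dsimp only at h ⊢
        cases hg : PySem.Dict.get? graph n with
        | none => rw [hg] at h; simp at h
        | some cs =>
          rw [hg] at h; try rw [hg]
          dsimp only at h ⊢
          cases hf : cs.foldl
            (fun (acc : Option (PySem.Dict Int Int)) c =>
              match acc with
              | none => none
              | some res =>
                match pureF graph dest cacheD f c with
                | none => none
                | some m => some (pvMerge res m))
            (some PySem.Dict.empty) with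
          | none => rw [hf] at h; simp at h
          | some r =>
            rw [hf] at h
            rw [pureF_fold_mono graph dest cacheD f ih cs _ r hf]
            simpa using h

theorem pureF_mono (graph : PySem.Dict String (List String)) (dest : String)
    (cacheD : PySem.Dict String (List (Int × Int))) {f g : Nat} (hfg : f ≤ g) :
    ∀ n v, pureF graph dest cacheD f n = some v → pureF graph dest cacheD g n = some v := by
  induction g with
  | zero => intro n v h; have : f = 0 := by omega
            subst this; exact h
  | succ g ih =>
    intro n v h
    rcases Nat.lt_or_ge f (g+1) with hlt | hge
    · have : f ≤ g := by omega
      exact pureF_mono_succ graph dest cacheD g n v (ih this n v h)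
    · have : f = g + 1 := by omega
      subst this; exact h

theorem PureV_func (graph : PySem.Dict String (List String)) (dest : String)
    (cacheD : PySem.Dict String (List (Int × Int))) (n : String) (v w : List (Int × Int))
    (hv : PureV graph dest cacheD n v) (hw : PureV graph dest cacheD n w) : v = w := by
  obtain ⟨f, hf⟩ := hv
  obtain ⟨g, hg⟩ := hw
  have h1 := pureF_mono graph dest cacheD (Nat.le_max_left f g) n v hf
  have h2 := pureF_mono graph dest cacheD (Nat.le_max_right f g) n w hg
  rw [h1] at h2; exact (Option.some.inj h2)

theorem pure_dest (graph : PySem.Dict String (List String)) (dest : String)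
    (cacheD : PySem.Dict String (List (Int × Int))) (fl : Int)
    (h : pvFlags.get? dest = some fl) : PureV graph dest cacheD dest [(fl, 1)] :=
  ⟨1, by simp [pureF, h]⟩

theorem pure_cached (graph : PySem.Dict String (List String)) (dest : String)
    (cacheD : PySem.Dict String (List (Int × Int))) (n : String) (v : List (Int × Int))
    (hn : n ≠ dest) (h : cacheD.get? n = some v) : PureV graph dest cacheD n v :=
  ⟨1, by simp [pureF, hn, h]⟩

-- if every child has a pure value, the option-threaded fold succeeds with the plain fold of those values
theorem pure_fold_of_forall (graph : PySem.Dict String (List String)) (dest : String)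
    (cacheD : PySem.Dict String (List (Int × Int))) (cs : List String)
    (vs : List (List (Int × Int))) (hv : List.Forall₂ (PureV graph dest cacheD) cs vs) :
    ∃ F, ∀ G, F ≤ G → ∀ res : PySem.Dict Int Int,
      cs.foldl
        (fun (acc : Option (PySem.Dict Int Int)) c =>
          match acc with
          | none => none
          | some res =>
            match pureF graph dest cacheD G c with
            | none => none
            | some m => some (pvMerge res m))
        (some res) = some (vs.foldl pvMerge res) := by
  induction hv with
  | nil => exact ⟨0, fun G _ res => rfl⟩
  | @cons c v cs vs hcv _ ih =>
    obtain ⟨f, hf⟩ := hcv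
    obtain ⟨F, hF⟩ := ih
    refine ⟨max f F, fun G hG res => ?_⟩
    simp only [List.foldl_cons]
    rw [pureF_mono graph dest cacheD (le_trans (Nat.le_max_left f F) hG) c v hf]
    exact hF G (le_trans (Nat.le_max_right f F) hG) (pvMerge res v)

theorem pure_node (graph : PySem.Dict String (List String)) (dest : String)
    (cacheD : PySem.Dict String (List (Int × Int))) (n : String) (cs : List String)
    (vs : List (List (Int × Int)))
    (hn : n ≠ dest) (hc : cacheD.get? n = none) (hg : graph.get? n = some cs)
    (hv : List.Forall₂ (PureV graph dest cacheD) cs vs) :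
    PureV graph dest cacheD n (pvShift n (vs.foldl pvMerge PySem.Dict.empty)).items := by
  obtain ⟨F, hF⟩ := pure_fold_of_forall graph dest cacheD cs vs hv
  refine ⟨F + 1, ?_⟩
  rw [pureF]
  simp only [if_neg hn, hc, hg]
  rw [hF F le_rfl PySem.Dict.empty]
  rfl

-- invariant of A's evolving cache: original entries intact, every entry is a pure value
def InvA (graph : PySem.Dict String (List String)) (dest : String)
    (cacheD c : PySem.Dict String (List (Int × Int))) : Prop :=
  (∀ k, (cacheD.get? k).isSome → c.get? k = cacheD.get? k) ∧
  (∀ k v, k ≠ dest → c.get? k = some v → PureV graph dest cacheD k v)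

def AMainP (graph : PySem.Dict String (List String)) (dest : String)
    (cacheD : PySem.Dict String (List (Int × Int))) (f : Nat) : Prop :=
  ∀ n c, InvA graph dest cacheD c →
    InvA graph dest cacheD (travA graph dest f n c).2 ∧
    (∀ k, (c.get? k).isSome → (travA graph dest f n c).2.get? k = c.get? k) ∧
    (∀ v, (travA graph dest f n c).1 = some v → PureV graph dest cacheD n v)

theorem foldA_step_none (graph : PySem.Dict String (List String)) (dest : String) (f : Nat)
    (cs : List String) (c : PySem.Dict String (List (Int × Int))) :
    cs.foldl
      (fun (st : Option (PySem.Dict Int Int) × PySem.Dict String (List (Int × Int))) child =>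
        match st with
        | (none, cc) => (none, cc)
        | (some res, cc) =>
          match travA graph dest f child cc with
          | (none, cc') => (none, cc')
          | (some opt, cc') => (some (pvMerge res opt), cc'))
      (none, c) = (none, c) := by
  induction cs with
  | nil => rfl
  | cons d ds ih => simpa using ih

theorem foldA (graph : PySem.Dict String (List String)) (dest : String)
    (cacheD : PySem.Dict String (List (Int × Int))) (f : Nat)
    (ih : AMainP graph dest cacheD f) (cs : List String) :
    ∀ (res : PySem.Dict Int Int) (c : PySem.Dict String (List (Int × Int))),
      InvA graph dest cacheD c →
      InvA graph dest cacheD (cs.foldl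
        (fun (st : Option (PySem.Dict Int Int) × PySem.Dict String (List (Int × Int))) child =>
          match st with
          | (none, cc) => (none, cc)
          | (some res, cc) =>
            match travA graph dest f child cc with
            | (none, cc') => (none, cc')
            | (some opt, cc') => (some (pvMerge res opt), cc'))
        (some res, c)).2 ∧
      (∀ k, (c.get? k).isSome → ((cs.foldl
        (fun (st : Option (PySem.Dict Int Int) × PySem.Dict String (List (Int × Int))) child =>
          match st with
          | (none, cc) => (none, cc)
          | (some res, cc) =>
            match travA graph dest f child cc with
            | (none, cc') => (none, cc')
            | (some opt, cc') => (some (pvMerge res opt), cc'))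
        (some res, c)).2).get? k = c.get? k) ∧
      (∀ r, (cs.foldl
        (fun (st : Option (PySem.Dict Int Int) × PySem.Dict String (List (Int × Int))) child =>
          match st with
          | (none, cc) => (none, cc)
          | (some res, cc) =>
            match travA graph dest f child cc with
            | (none, cc') => (none, cc')
            | (some opt, cc') => (some (pvMerge res opt), cc'))
        (some res, c)).1 = some r →
        ∃ vs, List.Forall₂ (PureV graph dest cacheD) cs vs ∧ r = vs.foldl pvMerge res) := by
  induction cs with
  | nil =>
    intro res c hc
    refine ⟨hc, fun k _ => rfl, fun r hr => ?_⟩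
    exact ⟨[], List.Forall₂.nil, by simpa using (Option.some.inj hr).symm⟩
  | cons child cs ihc =>
    intro res c hc
    obtain ⟨hinv, hext, hval⟩ := ih child c hc
    simp only [List.foldl_cons]
    rcases hp : travA graph dest f child c with ⟨o, cc'⟩
    rw [hp] at hinv hext hval
    cases o with
    | none =>
      dsimp only
      rw [foldA_step_none]
      refine ⟨hinv, fun k hk => hext k hk, fun r hr => by simp at hr⟩
    | some opt =>
      dsimp only
      obtain ⟨hinv', hext', hval'⟩ := ihc (pvMerge res opt) cc' hinv
      refine ⟨hinv', fun k hk => ?_, fun r hr => ?_⟩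
      · rw [hext' k (by rw [hext k hk]; exact hk), hext k hk]
      · obtain ⟨vs, hvs, hrr⟩ := hval' r hr
        exact ⟨opt :: vs, List.Forall₂.cons (hval opt rfl) hvs, hrr⟩

theorem A_main (graph : PySem.Dict String (List String)) (dest : String)
    (cacheD : PySem.Dict String (List (Int × Int))) :
    ∀ f, AMainP graph dest cacheD f := by
  intro f
  induction f with
  | zero =>
    intro n c hc
    exact ⟨hc, fun k _ => rfl, fun v hv => by simp [travA] at hv⟩
  | succ f ih =>
    intro n c hc
    rw [travA]
    by_cases hd : n = dest
    · simp only [if_pos hd]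
      cases hfl : pvFlags.get? n with
      | none => exact ⟨hc, fun k _ => rfl, fun v hv => by simp at hv⟩
      | some fl =>
        refine ⟨hc, fun k _ => rfl, fun v hv => ?_⟩
        subst hd
        exact (Option.some.inj hv) ▸ pure_dest graph n cacheD fl hfl
    · simp only [if_neg hd]
      cases hcn : c.get? n with
      | some v =>
        refine ⟨hc, fun k _ => rfl, fun w hw => ?_⟩
        exact (Option.some.inj hw) ▸ hc.2 n v hd hcn
      | none =>
        cases hg : graph.get? n with
        | none => exact ⟨hc, fun k _ => rfl, fun v hv => by simp at hv⟩
        | some children =>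
          dsimp only
          obtain ⟨hinv, hext, hval⟩ := foldA graph dest cacheD f ih children PySem.Dict.empty c hc
          rcases hst : children.foldl
            (fun (st : Option (PySem.Dict Int Int) × PySem.Dict String (List (Int × Int))) child =>
              match st with
              | (none, cc) => (none, cc)
              | (some res, cc) =>
                match travA graph dest f child cc with
                | (none, cc') => (none, cc')
                | (some opt, cc') => (some (pvMerge res opt), cc'))
            (some PySem.Dict.empty, c) with ⟨o, c'⟩
          rw [hst] at hinv hext hval
          have hc0 : cacheD.get? n = none := by
            cases h' : cacheD.get? n with
            | none => rfl
            | some w =>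
              have := hc.1 n (by rw [h']; rfl)
              rw [hcn, h'] at this
              exact absurd this (by simp)
          cases o with
          | none =>
            dsimp only
            exact ⟨hinv, hext, fun v hv => by simp at hv⟩
          | some res =>
            dsimp only
            obtain ⟨vs, hvs, hrr⟩ := hval res rfl
            have hpure : PureV graph dest cacheD n (pvShift n res).items := by
              rw [hrr]
              exact pure_node graph dest cacheD n children vs hd hc0 hg hvs
            refine ⟨⟨?_, ?_⟩, ?_, ?_⟩
            · intro k hk
              have hkn : k ≠ n := by
                intro h'; subst h'; rw [hc0] at hk; simp at hk
              rw [PySem.Dict.get?_insert_of_ne _ _ (hne := hkn)]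
              exact hinv.1 k hk
            · intro k v hkd hkv
              by_cases hkn : k = n
              · subst hkn
                rw [PySem.Dict.get?_insert_self] at hkv
                exact (Option.some.inj hkv) ▸ hpure
              · rw [PySem.Dict.get?_insert_of_ne _ _ (hne := hkn)] at hkv
                exact hinv.2 k v hkd hkv
            · intro k hk
              have hkn : k ≠ n := by
                intro h'; subst h'; rw [hcn] at hk; simp at hk
              rw [PySem.Dict.get?_insert_of_ne _ _ (hne := hkn)]
              exact hext k hk
            · intro v hv
              exact (Option.some.inj hv) ▸ hpure

theorem chain_decomp (graph : PySem.Dict String (List String)) (dest : String)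
    (cacheD : PySem.Dict String (List (Int × Int))) :
    ∀ (l1 : List String) (n : String) (l2 seen : List String),
      pvChainOK graph dest cacheD seen (l1 ++ n :: l2) = true →
      n ≠ dest ∧ cacheD.contains n = false ∧
        ∃ cs, graph.get? n = some cs ∧
          ∀ c ∈ cs, c = dest ∨ cacheD.contains c = true ∨ c ∈ seen ++ l1 := by
  intro l1
  induction l1 with
  | nil =>
    intro n l2 seen h
    rw [List.nil_append, pvChainOK, Bool.and_eq_true] at h
    obtain ⟨h1, _⟩ := h
    rw [Bool.and_eq_true, Bool.and_eq_true] at h1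
    obtain ⟨⟨hnd, hnc⟩, hcs⟩ := h1
    refine ⟨by simpa using hnd, by simpa using hnc, ?_⟩
    cases hg : graph.get? n with
    | none => rw [hg] at hcs; simp at hcs
    | some cs =>
      rw [hg] at hcs
      refine ⟨cs, rfl, fun c hcmem => ?_⟩
      rw [List.all_eq_true] at hcs
      have := hcs c hcmem
      simp only [Bool.or_eq_true, beq_iff_eq] at this
      rcases this with (h | h) | h
      · exact Or.inl h
      · exact Or.inr (Or.inl h)
      · exact Or.inr (Or.inr (by simpa using h))
  | cons m l1 ih =>
    intro n l2 seen h
    rw [List.cons_append, pvChainOK, Bool.and_eq_true] at h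
    obtain ⟨_, h2⟩ := h
    have := ih n l2 (seen ++ [m]) h2
    refine ⟨this.1, this.2.1, ?_⟩
    obtain ⟨cs, hcs, hmem⟩ := this.2.2
    refine ⟨cs, hcs, fun c hc => ?_⟩
    rcases hmem c hc with h | h | h
    · exact Or.inl h
    · exact Or.inr (Or.inl h)
    · refine Or.inr (Or.inr ?_)
      simp only [List.append_assoc, List.singleton_append] at h
      simp only [List.mem_append, List.mem_cons] at h ⊢
      tauto

-- the chain property at index i: children of L[i] are dest, cached, or in L.take i
theorem chain_idx (graph : PySem.Dict String (List String)) (dest : String)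
    (cacheD : PySem.Dict String (List (Int × Int))) (L : List String)
    (h : pvChainOK graph dest cacheD [] L = true) (i : Nat) (hi : i < L.length) :
    L[i] ≠ dest ∧ cacheD.contains L[i] = false ∧
      ∃ cs, graph.get? L[i] = some cs ∧
        ∀ c ∈ cs, c = dest ∨ cacheD.contains c = true ∨ c ∈ L.take i := by
  have hsplit : L = L.take i ++ L[i] :: L.drop (i + 1) := by
    conv_lhs => rw [← List.take_append_drop i L]
    rw [List.drop_eq_getElem_cons hi]
  rw [hsplit] at h
  have := chain_decomp graph dest cacheD (L.take i) L[i] (L.drop (i+1)) [] h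
  simpa using this

-- fuel ≥ 1 suffices for a node A answers immediately (dest with a flag, or present in cache)
theorem A_triv (graph : PySem.Dict String (List String)) (dest : String) (f : Nat)
    (n : String) (c : PySem.Dict String (List (Int × Int)))
    (h : (n = dest ∧ (pvFlags.get? n).isSome) ∨ (n ≠ dest ∧ (c.get? n).isSome)) :
    ((travA graph dest (f + 1) n c).1).isSome := by
  rw [travA]
  rcases h with ⟨hd, hfl⟩ | ⟨hd, hcn⟩
  · simp only [if_pos hd]
    cases hg : pvFlags.get? n with
    | none => rw [hg] at hfl; simp at hfl
    | some fl => simp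
  · simp only [if_neg hd]
    cases hcn' : c.get? n with
    | none => rw [hcn'] at hcn; simp at hcn
    | some v => simp

-- completeness of the children loop: every child is immediately answerable or listed earlier
theorem foldAC (graph : PySem.Dict String (List String)) (dest : String)
    (cacheD : PySem.Dict String (List (Int × Int))) (L : List String) (i : Nat) (f : Nat)
    (IH : ∀ j (hj : j < L.length), j < i → ∀ (c : PySem.Dict String (List (Int × Int))), InvA graph dest cacheD c →
        ∀ g, j + 2 ≤ g → ((travA graph dest g L[j] c).1).isSome ∧ InvA graph dest cacheD (travA graph dest g L[j] c).2)
    (hf : i + 1 ≤ f) :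
    ∀ (cs : List String)
      (_ : ∀ ch ∈ cs, (ch = dest ∧ (pvFlags.get? ch).isSome) ∨
            (ch ≠ dest ∧ (cacheD.get? ch).isSome) ∨ (∃ j, ∃ hj : j < L.length, j < i ∧ L[j] = ch))
      (res : PySem.Dict Int Int) (c : PySem.Dict String (List (Int × Int))),
      InvA graph dest cacheD c →
      ((cs.foldl
        (fun (st : Option (PySem.Dict Int Int) × PySem.Dict String (List (Int × Int))) child =>
          match st with
          | (none, cc) => (none, cc)
          | (some res, cc) =>
            match travA graph dest f child cc with
            | (none, cc') => (none, cc')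
            | (some opt, cc') => (some (pvMerge res opt), cc'))
        (some res, c)).1).isSome := by
  intro cs
  induction cs with
  | nil => intro _ res c _; simp
  | cons ch cs ihc =>
    intro hcs res c hc
    have hch := hcs ch (by simp)
    have hsome : ((travA graph dest f ch c).1).isSome ∧ InvA graph dest cacheD (travA graph dest f ch c).2 := by
      rcases hch with h | h | ⟨j, hj, hji, hLj⟩
      · obtain ⟨f', hf'⟩ : ∃ f', f = f' + 1 := ⟨f - 1, by omega⟩
        subst hf'
        exact ⟨A_triv graph dest f' ch c (Or.inl h), ((A_main graph dest cacheD (f'+1)) ch c hc).1⟩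
      · obtain ⟨f', hf'⟩ : ∃ f', f = f' + 1 := ⟨f - 1, by omega⟩
        subst hf'
        refine ⟨A_triv graph dest f' ch c (Or.inr ⟨h.1, ?_⟩), ((A_main graph dest cacheD (f'+1)) ch c hc).1⟩
        have := hc.1 ch h.2
        rw [this]; exact h.2
      · subst hLj
        exact IH j hj hji c hc f (by omega)
    simp only [List.foldl_cons]
    rcases hp : travA graph dest f ch c with ⟨o, cc'⟩
    rw [hp] at hsome
    cases o with
    | none => simp at hsome
    | some opt =>
      dsimp only
      exact ihc (fun ch' h' => hcs ch' (by simp [h'])) (pvMerge res opt) cc' hsome.2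

-- A answers every listed node, with fuel two more than its index
theorem A_comp (graph : PySem.Dict String (List String)) (dest : String)
    (cacheD : PySem.Dict String (List (Int × Int))) (L : List String)
    (hchain : pvChainOK graph dest cacheD [] L = true)
    (hdf : ∀ n ∈ L, ∀ cs, graph.get? n = some cs → dest ∈ cs → (pvFlags.get? dest).isSome) :
    ∀ i (hi : i < L.length), ∀ (c : PySem.Dict String (List (Int × Int))),
      InvA graph dest cacheD c → ∀ g, i + 2 ≤ g →
      ((travA graph dest g L[i] c).1).isSome ∧ InvA graph dest cacheD (travA graph dest g L[i] c).2 := by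
  intro i
  induction i using Nat.strong_induction_on with
  | _ i IH =>
    intro hi c hc g hg
    obtain ⟨g', rfl⟩ : ∃ g', g = g' + 1 := ⟨g - 1, by omega⟩
    refine ⟨?_, ((A_main graph dest cacheD (g'+1)) (L[i]) c hc).1⟩
    obtain ⟨hnd, hnc, cs, hgcs, hmem⟩ := chain_idx graph dest cacheD L hchain i hi
    rw [travA]
    simp only [if_neg hnd]
    cases hcn : c.get? L[i] with
    | some v => simp
    | none =>
      rw [hgcs]
      dsimp only
      have hfold := foldAC graph dest cacheD L i g'
        (fun j hj hji c' hc' g'' hg'' => IH j hji hj c' hc' g'' hg'')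
        (by omega) cs
        (fun ch hch => by
          by_cases hchd : ch = dest
          · subst hchd
            exact Or.inl ⟨rfl, hdf L[i] (List.getElem_mem hi) cs hgcs hch⟩
          · rcases hmem ch hch with h | h | h
            · exact absurd h hchd
            · refine Or.inr (Or.inl ⟨hchd, ?_⟩)
              rw [PySem.Dict.contains_eq_isSome_get?] at h; exact h
            · obtain ⟨j, hjlen, hjc⟩ := List.getElem_of_mem h
              rw [List.getElem_take] at hjc
              refine Or.inr (Or.inr ⟨j, by
                have := hjlen; rw [List.length_take] at this; omega, by
                have := hjlen; rw [List.length_take] at this; omega, hjc⟩))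
        PySem.Dict.empty c hc
      rcases hst : cs.foldl
        (fun (st : Option (PySem.Dict Int Int) × PySem.Dict String (List (Int × Int))) child =>
          match st with
          | (none, cc) => (none, cc)
          | (some res, cc) =>
            match travA graph dest g' child cc with
            | (none, cc') => (none, cc')
            | (some opt, cc') => (some (pvMerge res opt), cc'))
        (some PySem.Dict.empty, c) with ⟨o, c'⟩
      rw [hst] at hfold
      cases o with
      | none => simp at hfold
      | some res => simp

theorem nodup_length_le {l1 l2 : List String} (h : l1.Nodup) (hs : l1 ⊆ l2) :
    l1.length ≤ l2.length := by
  calc l1.length = l1.toFinset.card := (List.toFinset_card_of_nodup h).symm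
  _ ≤ l2.toFinset.card := Finset.card_le_card (fun x hx => by
      simp only [List.mem_toFinset] at hx ⊢; exact hs hx)
  _ ≤ l2.length := l2.toFinset_card_le

-- any member of the order L has a graph entry
theorem L_get (graph : PySem.Dict String (List String)) (dest : String)
    (cacheD : PySem.Dict String (List (Int × Int))) (L : List String)
    (hchain : pvChainOK graph dest cacheD [] L = true) {n : String} (hn : n ∈ L) :
    n ≠ dest ∧ cacheD.contains n = false ∧
      ∃ cs, graph.get? n = some cs ∧ ∀ c ∈ cs, c = dest ∨ cacheD.contains c = true ∨ c ∈ L := by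
  obtain ⟨i, hi, rfl⟩ := List.getElem_of_mem hn
  obtain ⟨h1, h2, cs, h3, h4⟩ := chain_idx graph dest cacheD L hchain i hi
  exact ⟨h1, h2, cs, h3, fun c hc => by
    rcases h4 c hc with h | h | h
    · exact Or.inl h
    · exact Or.inr (Or.inl h)
    · exact Or.inr (Or.inr (List.mem_of_mem_take h))⟩

-- one pass of Source B's phase-1 loop, with all its invariants
theorem reach_pass (graph : PySem.Dict String (List String)) (dest : String)
    (cacheD : PySem.Dict String (List (Int × Int))) (L : List String)
    (hchain : pvChainOK graph dest cacheD [] L = true) :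
    ∀ (frontier reach nxt0 : List String),
      reach.Nodup → (∀ n ∈ reach, n ∈ L) →
      (∀ c ∈ frontier, c = dest ∨ cacheD.contains c = true ∨ c ∈ L) →
      ∃ reach' nxt',
        frontier.foldl
          (fun acc n =>
            match acc with
            | none => none
            | some (reach, nxt) =>
              if n ≠ dest ∧ cacheD.contains n = false ∧ n ∉ reach then
                match graph.get? n with
                | none => none
                | some cs => some (reach ++ [n], nxt ++ cs)
              else some (reach, nxt))
          (some (reach, nxt0)) = some (reach', nxt') ∧
        reach'.Nodup ∧ (∀ n ∈ reach', n ∈ L) ∧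
        (∃ pre, reach' = reach ++ pre ∧
          ∀ n ∈ pre, ∃ cs, graph.get? n = some cs ∧ ∀ c ∈ cs, c ∈ nxt') ∧
        (∃ post, nxt' = nxt0 ++ post ∧ ∀ c ∈ post, c = dest ∨ cacheD.contains c = true ∨ c ∈ L) ∧
        (reach' = reach → nxt' = nxt0) ∧
        (∀ c ∈ frontier, c = dest ∨ cacheD.contains c = true ∨ c ∈ reach') := by
  intro frontier
  induction frontier with
  | nil =>
    intro reach nxt0 h1 h2 _
    exact ⟨reach, nxt0, rfl, h1, h2, ⟨[], by simp⟩, ⟨[], by simp⟩, fun _ => rfl, by simp⟩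
  | cons n fr ih =>
    intro reach nxt0 h1 h2 h3
    simp only [List.foldl_cons]
    by_cases hact : n ≠ dest ∧ cacheD.contains n = false ∧ n ∉ reach
    · rw [if_pos hact]
      have hnL : n ∈ L := by
        rcases h3 n (by simp) with h | h | h
        · exact absurd h hact.1
        · rw [h] at hact; simp at hact
        · exact h
      obtain ⟨_, _, cs, hgcs, hcsL⟩ := L_get graph dest cacheD L hchain hnL
      rw [hgcs]
      dsimp only
      obtain ⟨reach', nxt', hfold, hnd, hL, ⟨pre, hpre, hprecs⟩, ⟨post, hpost, hpostL⟩, hsame, hfr⟩ :=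
        ih (reach ++ [n]) (nxt0 ++ cs)
          (by
            rw [List.nodup_append]
            refine ⟨h1, List.nodup_singleton n, ?_⟩
            intro a ha b hb
            rw [List.mem_singleton] at hb; subst hb
            exact fun he => hact.2.2 (he ▸ ha))
          (by intro m hm; rcases List.mem_append.mp hm with h | h
              · exact h2 m h
              · simp at h; subst h; exact hnL)
          (fun c hc => h3 c (by simp [hc]))
      refine ⟨reach', nxt', hfold, hnd, hL, ?_, ?_, ?_, ?_⟩
      · refine ⟨n :: pre, by rw [hpre, List.append_assoc]; rfl, ?_⟩
        intro m hm
        rcases List.mem_cons.mp hm with h | h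
        · subst h
          refine ⟨cs, hgcs, fun c hc => ?_⟩
          rw [hpost]
          simp [List.mem_append, hc]
        · exact hprecs m h
      · refine ⟨cs ++ post, by rw [hpost, List.append_assoc], fun c hc => ?_⟩
        rcases List.mem_append.mp hc with h | h
        · exact hcsL c h
        · exact hpostL c h
      · intro he
        exfalso
        have h' : (reach ++ [n] ++ pre).length = reach.length := by rw [← hpre, he]
        simp [List.length_append] at h'
      · intro c hc
        rcases List.mem_cons.mp hc with h | h
        · subst h
          refine Or.inr (Or.inr ?_)
          rw [hpre]
          simp
        · exact hfr c h
    · rw [if_neg hact]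
      obtain ⟨reach', nxt', hfold, hnd, hL, hpre, hpost, hsame, hfr⟩ :=
        ih reach nxt0 h1 h2 (fun c hc => h3 c (by simp [hc]))
      refine ⟨reach', nxt', hfold, hnd, hL, hpre, hpost, hsame, ?_⟩
      intro c hc
      rcases List.mem_cons.mp hc with h | h
      · subst h
        push Not at hact
        by_cases hd : c = dest
        · exact Or.inl hd
        · by_cases hcc : cacheD.contains c = true
          · exact Or.inr (Or.inl hcc)
          · obtain ⟨pre, hpre, -⟩ := hpre
            have : c ∈ reach := hact (by simpa using hd) (by simpa using hcc)
            exact Or.inr (Or.inr (by rw [hpre]; exact List.mem_append.mpr (Or.inl this)))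
      · exact hfr c h

theorem reach_loop (graph : PySem.Dict String (List String)) (dest : String)
    (cacheD : PySem.Dict String (List (Int × Int))) (L : List String)
    (hchain : pvChainOK graph dest cacheD [] L = true) :
    ∀ (f : Nat) (reach frontier : List String),
      reach.Nodup → (∀ n ∈ reach, n ∈ L) →
      (∀ c ∈ frontier, c = dest ∨ cacheD.contains c = true ∨ c ∈ L) →
      (∀ n ∈ reach, ∃ cs, graph.get? n = some cs ∧
        ∀ c ∈ cs, c = dest ∨ cacheD.contains c = true ∨ c ∈ reach ∨ c ∈ frontier) →
      L.length + 2 ≤ f + reach.length →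
      ∃ reach', travBReach graph dest cacheD f reach frontier = some reach' ∧
        reach'.Nodup ∧ (∀ n ∈ reach', n ∈ L) ∧ (∃ pre, reach' = reach ++ pre) ∧
        (∀ n ∈ reach', ∃ cs, graph.get? n = some cs ∧
          ∀ c ∈ cs, c = dest ∨ cacheD.contains c = true ∨ c ∈ reach') ∧
        (∀ c ∈ frontier, c = dest ∨ cacheD.contains c = true ∨ c ∈ reach') := by
  intro f
  induction f with
  | zero =>
    intro reach frontier h1 h2 _ _ hfuel
    exfalso
    have := nodup_length_le h1 (fun x hx => h2 x hx)
    omega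
  | succ f ih =>
    intro reach frontier h1 h2 h3 hclo hfuel
    cases frontier with
    | nil =>
      refine ⟨reach, rfl, h1, h2, ⟨[], by simp⟩, ?_, by simp⟩
      intro n hn
      obtain ⟨cs, hcs, hc⟩ := hclo n hn
      exact ⟨cs, hcs, fun c hcm => by
        rcases hc c hcm with h | h | h | h
        · exact Or.inl h
        · exact Or.inr (Or.inl h)
        · exact Or.inr (Or.inr h)
        · simp at h⟩
    | cons x xs =>
      obtain ⟨reach', nxt', hfold, hnd, hL, ⟨pre, hpre, hprecs⟩, ⟨post, hpost, hpostL⟩, hsame, hfr⟩ :=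
        reach_pass graph dest cacheD L hchain (x :: xs) reach [] h1 h2 h3
      rw [travBReach]
      rw [show travBReachPass graph dest cacheD (x :: xs) reach = some (reach', nxt') from hfold]
      dsimp only
      have hclo' : ∀ n ∈ reach', ∃ cs, graph.get? n = some cs ∧
          ∀ c ∈ cs, c = dest ∨ cacheD.contains c = true ∨ c ∈ reach' ∨ c ∈ nxt' := by
        intro n hn
        rw [hpre] at hn
        rcases List.mem_append.mp hn with hold | hnew
        · obtain ⟨cs, hcs, hc⟩ := hclo n hold
          refine ⟨cs, hcs, fun c hcm => ?_⟩
          rcases hc c hcm with h | h | h | h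
          · exact Or.inl h
          · exact Or.inr (Or.inl h)
          · exact Or.inr (Or.inr (Or.inl (by rw [hpre]; exact List.mem_append.mpr (Or.inl h))))
          · rcases hfr c h with h' | h' | h'
            · exact Or.inl h'
            · exact Or.inr (Or.inl h')
            · exact Or.inr (Or.inr (Or.inl h'))
        · obtain ⟨cs, hcs, hc⟩ := hprecs n hnew
          exact ⟨cs, hcs, fun c hcm => Or.inr (Or.inr (Or.inr (hc c hcm)))⟩
      by_cases hre : reach' = reach
      · have hnxt : nxt' = [] := hsame hre
        subst hnxt
        have hret : travBReach graph dest cacheD f reach' [] = some reach' := by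
          cases f <;> rfl
        refine ⟨reach', hret, hnd, hL, ⟨pre, hpre⟩, ?_, hfr⟩
        intro n hn
        obtain ⟨cs, hcs, hc⟩ := hclo' n hn
        exact ⟨cs, hcs, fun c hcm => by
          rcases hc c hcm with h | h | h | h
          · exact Or.inl h
          · exact Or.inr (Or.inl h)
          · exact Or.inr (Or.inr h)
          · simp at h⟩
      · have hlen : reach.length + 1 ≤ reach'.length := by
          rw [hpre]
          cases pre with
          | nil => exact absurd (by simpa using hpre) hre
          | cons p ps => simp
        obtain ⟨rf, hrf, hnd2, hL2, ⟨pre2, hpre2⟩, hclo2, hfr2⟩ :=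
          ih reach' nxt'
            hnd hL
            (by rw [hpost]; simpa using hpostL)
            hclo'
            (by omega)
        refine ⟨rf, hrf, hnd2, hL2, ⟨pre ++ pre2, by rw [hpre2, hpre, List.append_assoc]⟩, hclo2, ?_⟩
        intro c hc
        rcases hfr c hc with h | h | h
        · exact Or.inl h
        · exact Or.inr (Or.inl h)
        · refine Or.inr (Or.inr ?_)
          rw [hpre2]; exact List.mem_append.mpr (Or.inl h)
      intro hcontra
      simp at hcontra

-- memo invariant of phase 2: entries are pure values, original cache keys are present
def KP (graph : PySem.Dict String (List String)) (dest : String)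
    (cacheD memo : PySem.Dict String (List (Int × Int))) : Prop :=
  (∀ k v, k ≠ dest → memo.get? k = some v → PureV graph dest cacheD k v) ∧
  (∀ k, cacheD.contains k = true → memo.contains k = true)

theorem resolve_fold (graph : PySem.Dict String (List String)) (dest : String)
    (cacheD memo : PySem.Dict String (List (Int × Int)))
    (hkp : KP graph dest cacheD memo) (cs : List String)
    (hres : ∀ c ∈ cs, c = dest ∨ memo.contains c = true)
    (hflag : dest ∈ cs → (pvFlags.get? dest).isSome) :
    ∃ vs, List.Forall₂ (PureV graph dest cacheD) cs vs ∧
      ∀ res : PySem.Dict Int Int,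
        cs.foldl
          (fun (acc : Option (PySem.Dict Int Int)) c =>
            match acc with
            | none => none
            | some res =>
              match (if c = dest then (pvFlags.get? c).map (fun fl => [(fl, 1)]) else memo.get? c) with
              | none => none
              | some m => some (pvMerge res m))
          (some res) = some (vs.foldl pvMerge res) := by
  induction cs with
  | nil => exact ⟨[], List.Forall₂.nil, fun res => rfl⟩
  | cons c cs ih =>
    obtain ⟨vs, hvs, hfold⟩ := ih (fun c' h' => hres c' (by simp [h'])) (fun h => hflag (by simp [h]))
    by_cases hcd : c = dest
    · subst hcd
      cases hfl : pvFlags.get? c with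
      | none => exact absurd (by rw [hfl]; rfl : (pvFlags.get? c).isSome = false) (by
          rw [hflag (by simp)]; simp)
      | some fl =>
        refine ⟨[(fl, 1)] :: vs, List.Forall₂.cons (pure_dest graph c cacheD fl hfl) hvs, fun res => ?_⟩
        simp only [List.foldl_cons, hfl]
        exact hfold (pvMerge res [(fl, 1)])
    · have hcm : memo.contains c = true := by
        rcases hres c (by simp) with h | h
        · exact absurd h hcd
        · exact h
      rw [PySem.Dict.contains_eq_isSome_get?] at hcm
      cases hm : memo.get? c with
      | none => rw [hm] at hcm; simp at hcm
      | some m =>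
        refine ⟨m :: vs, List.Forall₂.cons (hkp.1 c m hcd hm) hvs, fun res => ?_⟩
        simp only [List.foldl_cons, if_neg hcd, hm]
        exact hfold (pvMerge res m)

theorem resolve_ok (graph : PySem.Dict String (List String)) (dest : String)
    (cacheD memo : PySem.Dict String (List (Int × Int)))
    (hkp : KP graph dest cacheD memo) (n : String) (cs : List String)
    (hnd : n ≠ dest) (hnc : cacheD.contains n = false)
    (hg : graph.get? n = some cs)
    (hres : ∀ c ∈ cs, c = dest ∨ memo.contains c = true)
    (hflag : dest ∈ cs → (pvFlags.get? dest).isSome) :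
    ∃ items, travBResolve dest memo n cs = some items ∧ PureV graph dest cacheD n items := by
  obtain ⟨vs, hvs, hfold⟩ := resolve_fold graph dest cacheD memo hkp cs hres hflag
  refine ⟨(pvShift n (vs.foldl pvMerge PySem.Dict.empty)).items, ?_, ?_⟩
  · rw [travBResolve]
    rw [hfold PySem.Dict.empty]
  · refine pure_node graph dest cacheD n cs vs hnd ?_ hg hvs
    rw [PySem.Dict.contains_eq_isSome_get?] at hnc
    cases h : cacheD.get? n with
    | none => rfl
    | some v => rw [h] at hnc; simp at hnc

-- one pass of Source B's phase-2 loop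
theorem kahn_pass (graph : PySem.Dict String (List String)) (dest : String)
    (cacheD : PySem.Dict String (List (Int × Int))) (L : List String)
    (hchain : pvChainOK graph dest cacheD [] L = true)
    (hdf : ∀ n ∈ L, ∀ cs, graph.get? n = some cs → dest ∈ cs → (pvFlags.get? dest).isSome) :
    ∀ (remaining rest0 : List String) (memo : PySem.Dict String (List (Int × Int))),
      KP graph dest cacheD memo → (∀ n ∈ remaining, n ∈ L) →
      ∃ rest' memo',
        remaining.foldl
          (fun acc n =>
            match acc with
            | none => none
            | some (rest, memo) =>
              match graph.get? n with
              | none => none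
              | some cs =>
                if cs.all (fun c => c == dest || memo.contains c) then
                  match travBResolve dest memo n cs with
                  | none => none
                  | some items => some (rest, memo.insert n items)
                else some (rest ++ [n], memo))
          (some (rest0, memo)) = some (rest', memo') ∧
        KP graph dest cacheD memo' ∧
        (∀ k, memo.contains k = true → memo'.contains k = true) ∧
        ∃ sub, rest' = rest0 ++ sub ∧ (∀ x ∈ sub, x ∈ remaining) ∧
          sub.length ≤ remaining.length ∧
          ((∃ n ∈ remaining, ∀ cs, graph.get? n = some cs →
              ∀ c ∈ cs, c = dest ∨ memo.contains c = true) → sub.length < remaining.length) ∧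
          (∀ x ∈ remaining, x ∈ sub ∨ memo'.contains x = true) := by
  intro remaining
  induction remaining with
  | nil =>
    intro rest0 memo hkp _
    exact ⟨rest0, memo, rfl, hkp, fun _ h => h, [], by simp, by simp, by simp, by simp, by simp⟩
  | cons n rem ih =>
    intro rest0 memo hkp hrL
    have hnL : n ∈ L := hrL n (by simp)
    obtain ⟨hnd, hnc, cs, hgcs, hcsmem⟩ := L_get graph dest cacheD L hchain hnL
    simp only [List.foldl_cons]
    rw [hgcs]
    dsimp only
    by_cases hall : cs.all (fun c => c == dest || memo.contains c) = true
    · rw [if_pos hall]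
      have hres : ∀ c ∈ cs, c = dest ∨ memo.contains c = true := by
        intro c hc
        have := List.all_eq_true.mp hall c hc
        simp only [Bool.or_eq_true, beq_iff_eq] at this
        exact this
      obtain ⟨items, hri, hpure⟩ := resolve_ok graph dest cacheD memo hkp n cs hnd hnc hgcs hres
        (fun h => hdf n hnL cs hgcs h)
      rw [hri]
      dsimp only
      have hkp' : KP graph dest cacheD (memo.insert n items) := by
        constructor
        · intro k v hkd hkv
          by_cases hkn : k = n
          · subst hkn
            rw [PySem.Dict.get?_insert_self] at hkv
            exact (Option.some.inj hkv) ▸ hpure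
          · rw [PySem.Dict.get?_insert_of_ne _ _ (hne := hkn)] at hkv
            exact hkp.1 k v hkd hkv
        · intro k hk
          have := hkp.2 k hk
          rw [PySem.Dict.contains_insert]
          simp [this]
      obtain ⟨rest', memo', hfold, hkp2, hmono, sub, hsub, hsubmem, hsublen, hsubwit, hrem⟩ :=
        ih rest0 (memo.insert n items) hkp' (fun m hm => hrL m (by simp [hm]))
      refine ⟨rest', memo', hfold, hkp2, ?_, sub, hsub, fun x hx => by simp [hsubmem x hx], by simp; omega, ?_, ?_⟩
      · intro k hk
        refine hmono k ?_
        rw [PySem.Dict.contains_insert]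
        simp [hk]
      · intro _
        have := hsublen
        simp
        omega
      · intro x hx
        rcases List.mem_cons.mp hx with h | h
        · subst h
          refine Or.inr (hmono x ?_)
          exact PySem.Dict.contains_insert_self _ _ _
        · rcases hrem x h with h' | h'
          · exact Or.inl h'
          · exact Or.inr h'
    · rw [if_neg hall]
      obtain ⟨rest', memo', hfold, hkp2, hmono, sub, hsub, hsubmem, hsublen, hsubwit, hrem⟩ :=
        ih (rest0 ++ [n]) memo hkp (fun m hm => hrL m (by simp [hm]))
      refine ⟨rest', memo', hfold, hkp2, hmono, n :: sub, ?_, ?_, by simp; omega, ?_, ?_⟩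
      · rw [hsub, List.append_assoc]; rfl
      · intro x hx
        rcases List.mem_cons.mp hx with h | h
        · simp [h]
        · simp [hsubmem x h]
      · rintro ⟨m, hm, hmres⟩
        rcases List.mem_cons.mp hm with h | h
        · subst h
          exfalso
          apply hall
          rw [List.all_eq_true]
          intro c hc
          rcases hmres cs hgcs c hc with h' | h'
          · simp [h']
          · simp [h']
        · have : sub.length < rem.length := hsubwit ⟨m, h, hmres⟩
          simp
          omega
      · intro x hx
        rcases List.mem_cons.mp hx with h | h
        · exact Or.inl (by simp [h])
        · rcases hrem x h with h' | h'
          · exact Or.inl (by simp [h'])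
          · exact Or.inr h'

theorem first_in (remaining : List String) :
    ∀ (L : List String), (∃ x, x ∈ remaining ∧ x ∈ L) →
      ∃ l1 n l2, L = l1 ++ n :: l2 ∧ n ∈ remaining ∧ ∀ y ∈ l1, y ∉ remaining := by
  intro L
  induction L with
  | nil => rintro ⟨x, _, hx⟩; simp at hx
  | cons a L ih =>
    rintro ⟨x, hxr, hxL⟩
    by_cases ha : a ∈ remaining
    · exact ⟨[], a, L, rfl, ha, by simp⟩
    · have : ∃ x, x ∈ remaining ∧ x ∈ L := by
        refine ⟨x, hxr, ?_⟩
        rcases List.mem_cons.mp hxL with h | h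
        · subst h; exact absurd hxr ha
        · exact h
      obtain ⟨l1, n, l2, hL, hnr, hl1⟩ := ih this
      refine ⟨a :: l1, n, l2, by rw [hL]; rfl, hnr, ?_⟩
      intro y hy
      rcases List.mem_cons.mp hy with h | h
      · subst h; exact ha
      · exact hl1 y h

theorem exists_resolvable (graph : PySem.Dict String (List String)) (dest : String)
    (cacheD : PySem.Dict String (List (Int × Int))) (L : List String)
    (hchain : pvChainOK graph dest cacheD [] L = true)
    (memo : PySem.Dict String (List (Int × Int)))
    (hmono : ∀ k, cacheD.contains k = true → memo.contains k = true)
    (remaining : List String) (hne : remaining ≠ [])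
    (hrL : ∀ n ∈ remaining, n ∈ L)
    (hclo : ∀ n ∈ remaining, ∀ cs, graph.get? n = some cs →
      ∀ c ∈ cs, c = dest ∨ memo.contains c = true ∨ c ∈ remaining) :
    ∃ n ∈ remaining, ∀ cs, graph.get? n = some cs →
      ∀ c ∈ cs, c = dest ∨ memo.contains c = true := by
  obtain ⟨x, hx⟩ : ∃ x, x ∈ remaining := by
    cases remaining with
    | nil => exact absurd rfl hne
    | cons a l => exact ⟨a, by simp⟩
  obtain ⟨l1, n, l2, hL, hnr, hl1⟩ := first_in remaining L ⟨x, hx, hrL x hx⟩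
  refine ⟨n, hnr, fun cs hgcs c hc => ?_⟩
  rw [hL] at hchain
  obtain ⟨-, -, cs', hgcs', hmem⟩ := chain_decomp graph dest cacheD l1 n l2 [] hchain
  rw [hgcs] at hgcs'
  obtain rfl := Option.some.inj hgcs'
  rcases hmem c hc with h | h | h
  · exact Or.inl h
  · exact Or.inr (hmono c h)
  · rw [List.nil_append] at h
    rcases hclo n hnr cs hgcs c hc with h' | h' | h'
    · exact Or.inl h'
    · exact Or.inr h'
    · exact absurd h' (hl1 c h)

theorem kahn_loop (graph : PySem.Dict String (List String)) (dest : String)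
    (cacheD : PySem.Dict String (List (Int × Int))) (L : List String) (node : String)
    (hchain : pvChainOK graph dest cacheD [] L = true)
    (hdf : ∀ n ∈ L, ∀ cs, graph.get? n = some cs → dest ∈ cs → (pvFlags.get? dest).isSome) :
    ∀ (f : Nat) (remaining : List String) (memo : PySem.Dict String (List (Int × Int))),
      KP graph dest cacheD memo → (∀ n ∈ remaining, n ∈ L) →
      (∀ n ∈ remaining, ∀ cs, graph.get? n = some cs →
        ∀ c ∈ cs, c = dest ∨ memo.contains c = true ∨ c ∈ remaining) →
      (node ∈ remaining ∨ memo.contains node = true) →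
      remaining.length + 1 ≤ f →
      ∃ memo', travBKahn graph dest f remaining memo = some memo' ∧
        KP graph dest cacheD memo' ∧ memo'.contains node = true := by
  intro f
  induction f with
  | zero => intro remaining memo _ _ _ _ hf; omega
  | succ f ih =>
    intro remaining memo hkp hrL hclo hnode hf
    cases hrem : remaining with
    | nil =>
      subst hrem
      refine ⟨memo, rfl, hkp, ?_⟩
      rcases hnode with h | h
      · simp at h
      · exact h
    | cons a rem =>
      subst hrem
      obtain ⟨rest', memo', hfold, hkp', hmono, sub, hsub, hsubmem, hsublen, hsubwit, hremm⟩ :=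
        kahn_pass graph dest cacheD L hchain hdf (a :: rem) [] memo hkp hrL
      have hwit := exists_resolvable graph dest cacheD L hchain memo hkp.2 (a :: rem)
        (by simp) hrL hclo
      have hlt : sub.length < (a :: rem).length := hsubwit (by
        obtain ⟨n, hn, hres⟩ := hwit
        exact ⟨n, hn, hres⟩)
      rw [List.nil_append] at hsub
      subst hsub
      rw [travBKahn]
      rw [show travBKahnPass graph dest (a :: rem) memo = some (rest', memo') from hfold]
      dsimp only
      rw [if_neg (by omega : ¬ rest'.length = (a :: rem).length)]
      have hcloSub : ∀ n ∈ rest', ∀ cs, graph.get? n = some cs →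
          ∀ c ∈ cs, c = dest ∨ memo'.contains c = true ∨ c ∈ rest' := by
        intro n hn cs hgcs c hc
        rcases hclo n (hsubmem n hn) cs hgcs c hc with h | h | h
        · exact Or.inl h
        · exact Or.inr (Or.inl (hmono c h))
        · rcases hremm c h with h' | h'
          · exact Or.inr (Or.inr h')
          · exact Or.inr (Or.inl h')
      obtain ⟨memo'', hrun, hkp'', hnode''⟩ := ih rest' memo' hkp'
        (fun n hn => hrL n (hsubmem n hn)) hcloSub
        (by
          rcases hnode with h | h
          · rcases hremm node h with h' | h'
            · exact Or.inl h'
            · exact Or.inr h'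
          · exact Or.inr (hmono node h))
        (by simp at hlt hf ⊢; omega)
      exact ⟨memo'', hrun, hkp'', hnode''⟩
      intro hcontra
      simp at hcontra


-- ===== VERDICT (by name: the statement is the Claim_ definition above) =====
theorem traverse2_spec : Claim_equal_traverse2 := by
  intro graph node dest cache _ hpre
  obtain ⟨hgn, hcn, hinn, hLnd, hchain, hstart, hflag⟩ := hpre
  show traverse2 graph node dest cache = traverse2_alt graph node dest cache
  set graphD := PySem.Dict.mk graph with hgraphD
  set cacheD := PySem.Dict.mk cache with hcacheD
  set L := pvTopo graphD dest cacheD node with hLdef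
  have hdf : ∀ n ∈ L, ∀ cs, graphD.get? n = some cs → dest ∈ cs → (pvFlags.get? dest).isSome := by
    intro n hn cs hg hd
    have := hflag (Or.inr ⟨n, hn, by rw [PySem.Dict.getD_eq_get?_getD, hg]; exact hd⟩)
    rw [PySem.Dict.contains_eq_isSome_get?] at this
    exact this
  have hLkeys : L.length ≤ graph.length := by
    have hsub : L ⊆ graphD.keys := by
      intro n hn
      obtain ⟨-, -, cs, hcs, -⟩ := L_get graphD dest cacheD L hchain hn
      by_contra hmem
      rw [← PySem.Dict.get?_eq_none_iff_not_mem_keys] at hmem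
      rw [hmem] at hcs
      simp at hcs
    have := nodup_length_le hLnd hsub
    simpa [PySem.Dict.keys] using this
  obtain ⟨F, hF⟩ : ∃ F, graph.length + 2 = F + 1 := ⟨graph.length + 1, rfl⟩
  by_cases hnd : node = dest
  · -- both return the flag singleton
    subst hnd
    have hfl := hflag (Or.inl rfl)
    rw [PySem.Dict.contains_eq_isSome_get?] at hfl
    cases hflv : pvFlags.get? node with
    | none => rw [hflv] at hfl; simp at hfl
    | some fl =>
      rw [traverse2, traverse2_alt, hF, travA]
      simp only [hflv]
      rfl
  · by_cases hnc : cacheD.contains node = true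
    · -- cached at entry: both return the cache entry
      rw [PySem.Dict.contains_eq_isSome_get?] at hnc
      cases hcv : cacheD.get? node with
      | none => rw [hcv] at hnc; simp at hnc
      | some v =>
        rw [traverse2, traverse2_alt, hF, travA, ← hcacheD, ← hgraphD]
        simp only [if_neg hnd, hcv]
        rfl
    · -- node must be computed
      have hnL : node ∈ L := by
        rcases hstart with h | h | h
        · exact absurd h hnd
        · exact absurd h hnc
        · exact h
      have hInvA : InvA graphD dest cacheD cacheD :=
        ⟨fun k _ => rfl, fun k v hkd hkv => pure_cached graphD dest cacheD k v hkd hkv⟩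
      obtain ⟨i, hi, hieq⟩ := List.getElem_of_mem hnL
      have hAc := A_comp graphD dest cacheD L hchain hdf i hi cacheD hInvA (graph.length + 2)
        (by omega)
      rw [hieq] at hAc
      cases hAv : (travA graphD dest (graph.length + 2) node cacheD).1 with
      | none => rw [hAv] at hAc; simp at hAc
      | some v =>
        have hApure : PureV graphD dest cacheD node v := by
          have := (A_main graphD dest cacheD (graph.length + 2)) node cacheD hInvA
          exact this.2.2 v hAv
        -- B side
        have hcnone : cacheD.get? node = none := by
          rw [PySem.Dict.contains_eq_isSome_get?] at hnc
          cases h : cacheD.get? node with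
          | none => rfl
          | some w => rw [h] at hnc; simp at hnc
        obtain ⟨reach', hreach, hrnd, hrL, -, hrclo, hrfr⟩ :=
          reach_loop graphD dest cacheD L hchain (graph.length + 2) [] [node]
            (List.nodup_nil) (by simp)
            (by intro c hc; rw [List.mem_singleton] at hc; subst hc
                exact Or.inr (Or.inr hnL))
            (by simp)
            (by simp; omega)
        have hnreach : node ∈ reach' := by
          rcases hrfr node (by simp) with h | h | h
          · exact absurd h hnd
          · exact absurd h (by rw [PySem.Dict.contains_eq_isSome_get?, hcnone] at h ⊢; simp at h)
          · exact h
        have hKP : KP graphD dest cacheD cacheD :=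
          ⟨fun k v hkd hkv => pure_cached graphD dest cacheD k v hkd hkv, fun k hk => hk⟩
        obtain ⟨memo'', hkahn, hkp'', hnode''⟩ :=
          kahn_loop graphD dest cacheD L node hchain hdf (reach'.length + 1) reach' cacheD
            hKP hrL
            (by
              intro n hn cs hgcs c hc
              obtain ⟨cs', hgcs', hprop⟩ := hrclo n hn
              rw [hgcs] at hgcs'
              obtain rfl := Option.some.inj hgcs'
              exact hprop c hc)
            (Or.inl hnreach) le_rfl
        rw [PySem.Dict.contains_eq_isSome_get?] at hnode''
        cases hBv : memo''.get? node with
        | none => rw [hBv] at hnode''; simp at hnode''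
        | some w =>
          have hBpure : PureV graphD dest cacheD node w := hkp''.1 node w hnd hBv
          rw [traverse2, traverse2_alt, ← hcacheD, ← hgraphD]
          simp only [if_neg hnd]
          rw [hF] at hAv hreach ⊢
          rw [hAv, hcnone, hreach]
          dsimp only
          rw [hkahn]
          dsimp only
          rw [hBv]
          simp only [Option.getD_some]
          exact PureV_func graphD dest cacheD node v w hApure hBpure
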